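-- pv_equiv track=rewrite | github.com/wz1114841863/FigureSkating | alphapose/utils/jsonDataProc.py | jump_datas_proc
-- ===== SOURCE A (Python) =====
-- def jump_datas_proc(jump0, jump1):
--     """
--     比对两个人同作，相互作为参考。
--     """
--     len0 = len(jump0)
--     len1 = len(jump1)
--     assert len0 == len1
--     res0 = jump0.copy()
--     res1 = jump1.copy()
--     for i in range(20, len0 - 20):
--         if jump0[i] == True and sum(jump1[i - 20 : i + 21]) == 0:
--             res0[i] = False
--
--         if jump1[i] == True and sum(jump0[i - 20 : i + 21]) == 0:
--             res1[i] = False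
--
--     return res0, res1
-- ===== SOURCE B (Python) =====
-- def jump_datas_proc(jump0, jump1):
--     """
--     比对两个人同作,相互作为参考。
--     """
--     n = len(jump0)
--     assert n == len(jump1)
--     # prefix sums: p[k] = number of True in first k frames
--     p0 = [0] * (n + 1)
--     p1 = [0] * (n + 1)
--     for k in range(n):
--         p0[k + 1] = p0[k] + (1 if jump0[k] else 0)
--         p1[k + 1] = p1[k] + (1 if jump1[k] else 0)
--     res0 = [False if (a and 20 <= i < n - 20 and p1[i + 21] == p1[i - 20]) else a
--             for i, a in enumerate(jump0)]
--     res1 = [False if (b and 20 <= i < n - 20 and p0[i + 21] == p0[i - 20]) else b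
--             for i, b in enumerate(jump1)]
--     return res0, res1
-- ===== Notes on version B (the rewrite author's own statement) =====
-- stated objective: faster
-- what changed: Replaces the per-index 41-wide slice summation (re-scanning the window for every frame) by two prefix-sum arrays built in one pass, so each window-emptiness test becomes one subtraction-free prefix comparison; outputs are built by enumerate-comprehensions instead of in-place updates of copies.
import Mathlib
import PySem

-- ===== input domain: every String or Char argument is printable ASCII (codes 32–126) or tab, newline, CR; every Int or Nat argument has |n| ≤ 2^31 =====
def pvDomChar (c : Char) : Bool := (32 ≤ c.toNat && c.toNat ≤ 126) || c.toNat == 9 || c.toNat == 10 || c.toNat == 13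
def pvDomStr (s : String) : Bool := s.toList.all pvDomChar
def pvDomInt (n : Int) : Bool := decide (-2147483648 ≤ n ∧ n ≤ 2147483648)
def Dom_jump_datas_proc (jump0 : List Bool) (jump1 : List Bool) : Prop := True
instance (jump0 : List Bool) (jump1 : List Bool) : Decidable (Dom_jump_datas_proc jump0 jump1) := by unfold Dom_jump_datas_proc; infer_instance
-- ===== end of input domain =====

-- B replaces A's per-index 41-wide slice sums by one-pass prefix sums; return values proved identical.

-- ===== PORT A =====
-- A's if-condition: src[i] == True and sum(ref[i-20:i+21]) == 0
def pvCondA (src ref : List Bool) (i : Int) : Bool :=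
  PySem.List.pyGetD src i false &&
    decide (((PySem.List.slice ref (some (i - 20)) (some (i + 21))).map
      (fun b => if b then (1 : Int) else 0)).sum = 0)

def jump_datas_proc (jump0 : List Bool) (jump1 : List Bool) : List Bool × List Bool :=
  -- `assert len0 == len1` raises unless lengths are equal: excluded by Pre_
  (PySem.List.pyRange 20 ((jump0.length : Int) - 20) 1).foldl
    (fun (r : List Bool × List Bool) i =>
      ((if pvCondA jump0 jump1 i then r.1.set i.toNat false else r.1),
       (if pvCondA jump1 jump0 i then r.2.set i.toNat false else r.2)))
    (jump0, jump1)

-- ===== PORT B =====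
def jump_datas_proc_alt (jump0 : List Bool) (jump1 : List Bool) : List Bool × List Bool :=
  let n : Int := jump0.length
  let p0 : List Int := jump0.scanl (fun acc a => acc + (if a then 1 else 0)) 0
  let p1 : List Int := jump1.scanl (fun acc a => acc + (if a then 1 else 0)) 0
  let res0 := (PySem.List.enumerate jump0 0).map (fun (ia : Int × Bool) =>
    if ia.2 = true ∧ 20 ≤ ia.1 ∧ ia.1 < n - 20 ∧
       PySem.List.pyGetD p1 (ia.1 + 21) 0 = PySem.List.pyGetD p1 (ia.1 - 20) 0
    then false else ia.2)
  let res1 := (PySem.List.enumerate jump1 0).map (fun (ib : Int × Bool) =>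
    if ib.2 = true ∧ 20 ≤ ib.1 ∧ ib.1 < n - 20 ∧
       PySem.List.pyGetD p0 (ib.1 + 21) 0 = PySem.List.pyGetD p0 (ib.1 - 20) 0
    then false else ib.2)
  (res0, res1)

-- ===== PRECONDITION & SPEC =====
-- Pre_ excludes exactly the inputs where A's `assert len0 == len1` raises AssertionError.
def Pre_jump_datas_proc (jump0 : List Bool) (jump1 : List Bool) : Prop := jump0.length = jump1.length
instance (jump0 : List Bool) (jump1 : List Bool) : Decidable (Pre_jump_datas_proc jump0 jump1) := by unfold Pre_jump_datas_proc; infer_instance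
def pvWitness_jump_datas_proc : List Bool × List Bool := ([true, false, true], [false, true, true])

def Spec_jump_datas_proc (jump0 : List Bool) (jump1 : List Bool) (out : List Bool × List Bool) : Prop := out = jump_datas_proc_alt jump0 jump1
instance (jump0 : List Bool) (jump1 : List Bool) (out : List Bool × List Bool) : Decidable (Spec_jump_datas_proc jump0 jump1 out) := by unfold Spec_jump_datas_proc; infer_instance

-- ===== CLAIM (what is proved, stated in full; the proofs are below) =====
def Claim_equal_jump_datas_proc : Prop := ∀ (jump0 : List Bool) (jump1 : List Bool), Dom_jump_datas_proc jump0 jump1 → Pre_jump_datas_proc jump0 jump1 → Spec_jump_datas_proc jump0 jump1 (jump_datas_proc jump0 jump1)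

-- ===== LEMMAS AND PROOFS =====

theorem pvSet_getD (xs : List Bool) (m k : Nat) :
    (xs.set m false).getD k false = if m = k then false else xs.getD k false := by
  simp only [List.getD_eq_getElem?_getD, List.getElem?_set]
  split_ifs <;> simp_all

theorem pvFoldPair {α : Type} (L : List α) (f g : List Bool → α → List Bool)
    (b0 b1 : List Bool) :
    L.foldl (fun (r : List Bool × List Bool) i => (f r.1 i, g r.2 i)) (b0, b1)
      = (L.foldl f b0, L.foldl g b1) := by
  induction L generalizing b0 b1 with
  | nil => rfl
  | cons i L ih => simp [List.foldl, ih]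

theorem pvFoldSet_getD (c : Int → Bool) (L : List Int) (base : List Bool) (k : Nat) :
    (L.foldl (fun r i => if c i then r.set i.toNat false else r) base).getD k false
      = if L.any (fun i => (i.toNat == k) && c i) then false else base.getD k false := by
  induction L generalizing base with
  | nil => simp
  | cons i L ih =>
    rw [List.foldl_cons, ih, List.any_cons]
    have hset : (if c i then base.set i.toNat false else base).getD k false
        = if (i.toNat == k) && c i then false else base.getD k false := by
      by_cases hc : c i
      · rw [if_pos hc, pvSet_getD]
        by_cases hk : i.toNat = k <;> simp [hk, hc]
      · rw [if_neg hc]; simp [hc]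
    rw [hset]
    cases hik : ((i.toNat == k) && c i) <;> cases hany : L.any (fun i => (i.toNat == k) && c i) <;> simp [hik, hany]

theorem pvFoldSet_length (c : Int → Bool) (L : List Int) (base : List Bool) :
    (L.foldl (fun r i => if c i then r.set i.toNat false else r) base).length = base.length := by
  induction L generalizing base with
  | nil => rfl
  | cons i L ih =>
    rw [List.foldl_cons, ih]
    split_ifs <;> simp

-- prefix sums: the scanl value at index i counts the `true`s among the first i entries
theorem pvScanl_getD (xs : List Bool) (init : Int) (i : Nat) (hi : i ≤ xs.length) :
    (xs.scanl (fun (acc : Int) a => acc + (if a then 1 else 0)) init).getD i 0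
      = init + ((xs.take i).count true : Int) := by
  induction xs generalizing init i with
  | nil =>
    have h0 : i = 0 := Nat.le_zero.mp hi
    subst h0; simp [List.scanl_nil]
  | cons x xs ih =>
    cases i with
    | zero => simp [List.scanl_cons]
    | succ i =>
      rw [List.scanl_cons, List.getD_cons_succ, ih _ i (by simpa using hi)]
      cases x <;> simp [List.count_cons, List.take_succ_cons] <;> push_cast <;> ring

-- a window count is the difference of two prefix counts
theorem pvCount_window (xs : List Bool) (a w : Nat) :
    (xs.take (a + w)).count true = (xs.take a).count true + ((xs.drop a).take w).count true := by
  rw [List.take_add, List.count_append]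

theorem pv_sum_eq_count (l : List Bool) :
    (l.map (fun b => if b then (1 : Int) else 0)).sum = (l.count true : Int) := by
  induction l with
  | nil => simp
  | cons x l ih => cases x <;> simp [ih] <;> omega

-- the A-side condition at a nonnegative in-range index, in window form
theorem pvCondA_eq (src ref : List Bool) (k : Nat) (hk : 20 ≤ k) :
    pvCondA src ref (k : Int)
      = (src.getD k false && decide (((ref.drop (k - 20)).take 41).count true = 0)) := by
  unfold pvCondA
  have h1 : (k : Int) - 20 = ((k - 20 : Nat) : Int) := by push_cast [hk]; ring
  have h2 : (k : Int) + 21 = ((k - 20 : Nat) : Int) + ((41 : Nat) : Int) := by push_cast [hk]; ring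
  rw [PySem.List.pyGetD_natCast, h1, h2, PySem.List.slice_natCast_add, pv_sum_eq_count]
  simp [Nat.cast_eq_zero]

-- element k of the B-side comprehension
theorem pvMapEnum_getD (xs : List Bool) (f : Int × Bool → Bool) (k : Nat) (hk : k < xs.length) :
    ((PySem.List.enumerate xs 0).map f).getD k false = f ((k : Int), xs[k]) := by
  rw [List.getD_eq_getElem?_getD, List.getElem?_map, PySem.List.getElem?_enumerate]
  simp [List.getElem?_eq_getElem hk]

theorem pvListEq_of_getD (xs ys : List Bool) (hlen : xs.length = ys.length)
    (h : ∀ k, k < xs.length → xs.getD k false = ys.getD k false) : xs = ys := by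
  apply List.ext_getElem hlen
  intro k h1 h2
  have := h k h1
  rwa [List.getD_eq_getElem _ _ h1, List.getD_eq_getElem _ _ h2] at this

-- one output component: A's destructive loop equals B's prefix-sum comprehension
theorem pvComp (src ref : List Bool) (n : Int) (h1 : n = src.length) (h2 : n = ref.length) :
    (PySem.List.pyRange 20 (n - 20) 1).foldl
        (fun r i => if pvCondA src ref i then r.set i.toNat false else r) src
      = (PySem.List.enumerate src 0).map (fun (ia : Int × Bool) =>
          if ia.2 = true ∧ 20 ≤ ia.1 ∧ ia.1 < n - 20 ∧
             PySem.List.pyGetD (ref.scanl (fun (acc : Int) a => acc + (if a then 1 else 0)) 0) (ia.1 + 21) 0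
               = PySem.List.pyGetD (ref.scanl (fun (acc : Int) a => acc + (if a then 1 else 0)) 0) (ia.1 - 20) 0
          then false else ia.2) := by
  apply pvListEq_of_getD
  · rw [pvFoldSet_length, List.length_map, PySem.List.length_enumerate]
  · intro k hklen
    rw [pvFoldSet_getD, pvMapEnum_getD _ _ _ (by simpa [pvFoldSet_length] using hklen)]
    rw [pvFoldSet_length] at hklen
    -- characterize the ∃ over the range
    have hex : ((PySem.List.pyRange 20 (n - 20) 1).any
          (fun i => (i.toNat == k) && pvCondA src ref i))
        = (decide (20 ≤ (k : Int)) && (decide ((k : Int) < n - 20) && pvCondA src ref (k : Int))) := by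
      rw [Bool.eq_iff_iff]
      simp only [List.any_eq_true, PySem.List.mem_pyRange_one, Bool.and_eq_true, beq_iff_eq,
        decide_eq_true_eq]
      constructor
      · rintro ⟨i, hi, hik, hci⟩
        have : i = (k : Int) := by omega
        subst this
        exact ⟨hi.1, hi.2, hci⟩
      · rintro ⟨ha, hb, hc⟩
        exact ⟨(k : Int), ⟨ha, hb⟩, by omega, hc⟩
    rw [hex]
    by_cases h20 : 20 ≤ k
    · by_cases hlt : (k : Int) < n - 20
      · -- both windows live entirely inside the lists
        have hk20 : (20 : Int) ≤ (k : Int) := by exact_mod_cast h20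
        have e1 : (k : Int) + 21 = ((k + 21 : Nat) : Int) := by push_cast; ring
        have e2 : (k : Int) - 20 = ((k - 20 : Nat) : Int) := by push_cast [h20]; ring
        have hpref :
            (PySem.List.pyGetD (ref.scanl (fun (acc : Int) a => acc + (if a then 1 else 0)) 0)
                ((k : Int) + 21) 0
              = PySem.List.pyGetD (ref.scanl (fun (acc : Int) a => acc + (if a then 1 else 0)) 0)
                ((k : Int) - 20) 0)
            ↔ (((ref.drop (k - 20)).take 41).count true = 0) := by
          rw [e1, e2, PySem.List.pyGetD_natCast, PySem.List.pyGetD_natCast,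
              pvScanl_getD ref 0 (k + 21) (by omega), pvScanl_getD ref 0 (k - 20) (by omega)]
          have hsplit : k + 21 = (k - 20) + 41 := by omega
          rw [hsplit, pvCount_window]
          push_cast
          omega
        have hgd : src.getD k false = src[k]'hklen := List.getD_eq_getElem _ _ hklen
        simp only [pvCondA_eq src ref k h20, hpref]
        by_cases hb : src[k]'hklen = true
        · by_cases hwz : ((ref.drop (k - 20)).take 41).count true = 0
          · simp [hgd, hb, hwz, hk20, hlt, hpref, List.getElem?_eq_getElem hklen]
          · simp [hgd, hb, hwz, hpref, List.getElem?_eq_getElem hklen]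
        · have hb' : src[k]'hklen = false := by simpa using hb
          simp [hgd, hb', hpref, List.getElem?_eq_getElem hklen]
      · -- index right of the processed band: untouched on both sides
        simp [hlt, List.getElem?_eq_getElem hklen, List.getD_eq_getElem _ _ hklen]
    · -- index left of the processed band: untouched on both sides
      have h20' : ¬ (20 : Int) ≤ (k : Int) := by exact_mod_cast h20
      simp [h20', List.getElem?_eq_getElem hklen, List.getD_eq_getElem _ _ hklen]

-- ===== VERDICT (by name: the statement is the Claim_ definition above) =====
theorem jump_datas_proc_spec : Claim_equal_jump_datas_proc := by
  intro jump0 jump1 _ hpre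
  have hpre' : ((jump0.length : Int)) = (jump1.length : Int) := by exact_mod_cast hpre
  show jump_datas_proc jump0 jump1 = jump_datas_proc_alt jump0 jump1
  have hsplit : jump_datas_proc jump0 jump1
      = ((PySem.List.pyRange 20 ((jump0.length : Int) - 20) 1).foldl
           (fun r0 i => if pvCondA jump0 jump1 i then r0.set i.toNat false else r0) jump0,
         (PySem.List.pyRange 20 ((jump0.length : Int) - 20) 1).foldl
           (fun r1 i => if pvCondA jump1 jump0 i then r1.set i.toNat false else r1) jump1) :=
    pvFoldPair (PySem.List.pyRange 20 ((jump0.length : Int) - 20) 1)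
      (fun r0 i => if pvCondA jump0 jump1 i then r0.set i.toNat false else r0)
      (fun r1 i => if pvCondA jump1 jump0 i then r1.set i.toNat false else r1)
      jump0 jump1
  rw [hsplit]
  exact Prod.ext
    (pvComp jump0 jump1 (jump0.length : Int) rfl hpre')
    (pvComp jump1 jump0 (jump0.length : Int) hpre' rfl)
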